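-- pv_equiv track=rewrite | github.com/advsnr/aws-com | ec2_tags.py | with_keys
-- ===== SOURCE A (Python) =====
-- def with_keys(instances, keys):
--     ret = []
--
--     if type(keys) is str:
--         for instance in instances:
--             if keys in instance['tags'].keys():
--                 ret.append(instance)
--
--     if type(keys) is list:
--         for instance in instances:
--             for key in keys:
--                 if key in instance['tags'].keys():
--                     ret.append(instance)
--                     break
--     return ret
-- ===== SOURCE B (Python) =====
-- def with_keys(instances, keys):
--     if type(keys) is str:
--         keylist = [keys]
--     elif type(keys) is list:
--         keylist = keys
--     else:
--         keylist = []
--     hits = set()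
--     for k in keylist:
--         for i, inst in enumerate(instances):
--             if k in inst['tags']:
--                 hits.add(i)
--     return [instances[i] for i in sorted(hits)]
-- ===== Notes on version B (the rewrite author's own statement) =====
-- stated objective: alternative
-- what changed: B inverts the traversal: instead of scanning instance-by-instance with an inner key loop and break, it loops key-major over a normalized key list, accumulates the set of matching instance indices, and rebuilds the result by indexing at the sorted index set.
import Mathlib
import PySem

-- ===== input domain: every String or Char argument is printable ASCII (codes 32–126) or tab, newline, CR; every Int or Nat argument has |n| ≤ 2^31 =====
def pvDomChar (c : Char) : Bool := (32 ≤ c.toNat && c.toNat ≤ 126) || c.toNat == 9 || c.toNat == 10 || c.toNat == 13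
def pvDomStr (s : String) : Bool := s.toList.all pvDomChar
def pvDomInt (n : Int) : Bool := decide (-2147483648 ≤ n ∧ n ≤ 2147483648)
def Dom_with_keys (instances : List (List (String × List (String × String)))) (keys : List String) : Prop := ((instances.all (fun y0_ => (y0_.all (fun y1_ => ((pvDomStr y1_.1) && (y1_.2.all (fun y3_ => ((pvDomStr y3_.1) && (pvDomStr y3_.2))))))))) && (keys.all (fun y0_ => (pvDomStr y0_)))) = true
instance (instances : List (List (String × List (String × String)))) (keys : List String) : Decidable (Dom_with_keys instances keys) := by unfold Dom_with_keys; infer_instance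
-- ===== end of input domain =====

-- B inverts the traversal: key-major loops accumulate a set of matching instance indices, and the output is rebuilt by indexing at the sorted index set; same asymptotic cost, a genuinely different pass structure.
-- ===== PORT A =====
-- instance['tags'] (first-match dict lookup); Python raises KeyError when absent — those inputs are outside Pre_, the port reads [].
def pvTagsOf (inst : List (String × List (String × String))) : PySem.Dict String String :=
  PySem.Dict.mk ((PySem.Dict.mk inst).getD "tags" [])

-- A's inner 'for key in keys: if key in instance['tags'].keys(): ret.append(instance); break'
def withKeysInner (inst : List (String × List (String × String))) (keys : List String)
    (ret : List (List (String × List (String × String)))) : List (List (String × List (String × String))) :=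
  match keys with
  | [] => ret
  | k :: rest => if (pvTagsOf inst).contains k then ret ++ [inst] else withKeysInner inst rest ret

def with_keys (instances : List (List (String × List (String × String)))) (keys : List String) : List (List (String × List (String × String))) :=
  instances.foldl (fun ret inst => withKeysInner inst keys ret) []

-- ===== PORT B =====
-- 'for k in keylist: for i, inst in enumerate(instances): if k in inst["tags"]: hits.add(i)' then '[instances[i] for i in sorted(hits)]'
def with_keys_alt (instances : List (List (String × List (String × String)))) (keys : List String) : List (List (String × List (String × String))) :=
  let hits : PySem.Set Int :=
    keys.foldl (fun s k =>
      (PySem.List.enumerate instances 0).foldl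
        (fun s p => if (pvTagsOf p.2).contains k then PySem.Set.add s p.1 else s) s)
      PySem.Set.empty
  (PySem.List.sorted hits (fun x => x) false).map (fun i => PySem.List.pyGetD instances i [])

-- ===== PRECONDITION & SPEC =====
-- Python A raises KeyError exactly when keys is nonempty and some instance lacks a 'tags' entry; those inputs are excluded.
def Pre_with_keys (instances : List (List (String × List (String × String)))) (keys : List String) : Prop :=
  keys = [] ∨ ∀ inst ∈ instances, ((PySem.Dict.mk inst).get? "tags").isSome
instance (instances : List (List (String × List (String × String)))) (keys : List String) : Decidable (Pre_with_keys instances keys) := by unfold Pre_with_keys; infer_instance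
def pvWitness_with_keys : (List (List (String × List (String × String)))) × List String :=
  ([[("tags", [("env", "prod")])], [("tags", [("role", "db")])]], ["env", "x"])

def Spec_with_keys (instances : List (List (String × List (String × String)))) (keys : List String) (out : List (List (String × List (String × String)))) : Prop := out = with_keys_alt instances keys
instance (instances : List (List (String × List (String × String)))) (keys : List String) (out : List (List (String × List (String × String)))) : Decidable (Spec_with_keys instances keys out) := by unfold Spec_with_keys; infer_instance

-- ===== CLAIM (what is proved, stated in full; the proofs are below) =====
def Claim_equal_with_keys : Prop := ∀ (instances : List (List (String × List (String × String)))) (keys : List String), Dom_with_keys instances keys → Pre_with_keys instances keys → Spec_with_keys instances keys (with_keys instances keys)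

-- ===== LEMMAS AND PROOFS =====
-- A's inner break-loop appends the instance once iff some key is among its tag keys.
theorem withKeysInner_eq_any (inst : List (String × List (String × String))) (keys : List String)
    (ret : List (List (String × List (String × String)))) :
    withKeysInner inst keys ret = if keys.any (fun k => (pvTagsOf inst).contains k) then ret ++ [inst] else ret := by
  induction keys with
  | nil => simp [withKeysInner]
  | cons k rest ih =>
    simp only [withKeysInner, List.any_cons]
    by_cases h : (pvTagsOf inst).contains k <;> simp [h, ih]

-- membership in one inner pass of B over a list of (index, instance) pairs
theorem mem_innerFold (l : List (Int × List (String × List (String × String)))) (k : String)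
    (s : PySem.Set Int) (x : Int) :
    x ∈ l.foldl (fun s p => if (pvTagsOf p.2).contains k then PySem.Set.add s p.1 else s) s ↔
      x ∈ s ∨ ∃ p ∈ l, p.1 = x ∧ (pvTagsOf p.2).contains k := by
  induction l generalizing s with
  | nil => simp
  | cons p rest ih =>
    simp only [List.foldl_cons]
    by_cases h : (pvTagsOf p.2).contains k
    · rw [if_pos h, ih]
      simp only [PySem.Set.mem_add, List.mem_cons]
      constructor
      · rintro (⟨hx | rfl⟩ | ⟨q, hq, hqx, hqc⟩)
        · exact Or.inl hx
        · exact Or.inr ⟨p, Or.inl rfl, rfl, h⟩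
        · exact Or.inr ⟨q, Or.inr hq, hqx, hqc⟩
      · rintro (hx | ⟨q, hq | hq, hqx, hqc⟩)
        · exact Or.inl (Or.inl hx)
        · exact Or.inl (Or.inr (hq ▸ hqx.symm))
        · exact Or.inr ⟨q, hq, hqx, hqc⟩
    · rw [if_neg h, ih]
      simp only [List.mem_cons]
      constructor
      · rintro (hx | ⟨q, hq, hqx, hqc⟩)
        · exact Or.inl hx
        · exact Or.inr ⟨q, Or.inr hq, hqx, hqc⟩
      · rintro (hx | ⟨q, hq | hq, hqx, hqc⟩)
        · exact Or.inl hx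
        · exact absurd (hq ▸ hqc) (by simpa using h)
        · exact Or.inr ⟨q, hq, hqx, hqc⟩

-- one inner pass of B preserves Nodup of the accumulated set
theorem nodup_innerFold (l : List (Int × List (String × List (String × String)))) (k : String)
    (s : PySem.Set Int) (hs : s.Nodup) :
    (l.foldl (fun s p => if (pvTagsOf p.2).contains k then PySem.Set.add s p.1 else s) s).Nodup := by
  induction l generalizing s with
  | nil => exact hs
  | cons p rest ih =>
    simp only [List.foldl_cons]
    by_cases h : (pvTagsOf p.2).contains k
    · rw [if_pos h]; exact ih _ (PySem.Set.nodup_add _ _ hs)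
    · rw [if_neg h]; exact ih _ hs

-- membership in B's full hit set
theorem mem_hits (instances : List (List (String × List (String × String)))) (keys : List String)
    (s : PySem.Set Int) (x : Int) :
    x ∈ keys.foldl (fun s k =>
        (PySem.List.enumerate instances 0).foldl
          (fun s p => if (pvTagsOf p.2).contains k then PySem.Set.add s p.1 else s) s) s ↔
      x ∈ s ∨ ∃ k ∈ keys, ∃ p ∈ PySem.List.enumerate instances 0, p.1 = x ∧ (pvTagsOf p.2).contains k := by
  induction keys generalizing s with
  | nil => simp
  | cons k rest ih =>
    simp only [List.foldl_cons, ih, mem_innerFold]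
    constructor
    · rintro (⟨h | h⟩ | h)
      · exact Or.inl h
      · exact Or.inr ⟨k, by simp, h⟩
      · obtain ⟨k', hk', hp⟩ := h; exact Or.inr ⟨k', by simp [hk'], hp⟩
    · rintro (h | ⟨k', hk', hp⟩)
      · exact Or.inl (Or.inl h)
      · rcases List.mem_cons.mp hk' with h | h
        · exact Or.inl (Or.inr (h ▸ hp))
        · exact Or.inr ⟨k', h, hp⟩

theorem nodup_hits (instances : List (List (String × List (String × String)))) (keys : List String)
    (s : PySem.Set Int) (hs : s.Nodup) :
    (keys.foldl (fun s k =>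
        (PySem.List.enumerate instances 0).foldl
          (fun s p => if (pvTagsOf p.2).contains k then PySem.Set.add s p.1 else s) s) s).Nodup := by
  induction keys generalizing s with
  | nil => exact hs
  | cons k rest ih => exact ih _ (nodup_innerFold _ _ _ hs)

-- B computes the same list as filtering the instances by "some key is among the tags"
theorem alt_eq_filter (instances : List (List (String × List (String × String)))) (keys : List String) :
    with_keys_alt instances keys =
      instances.filter (fun inst => keys.any (fun k => (pvTagsOf inst).contains k)) := by
  unfold with_keys_alt
  dsimp only
  have hmem : ∀ x : Int, (x ∈ keys.foldl (fun s k =>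
        (PySem.List.enumerate instances 0).foldl
          (fun s p => if (pvTagsOf p.2).contains k then PySem.Set.add s p.1 else s) s)
        PySem.Set.empty) ↔
      ∃ (j : Nat) (hj : j < instances.length), x = (j : Int) ∧
        keys.any (fun k => (pvTagsOf instances[j]).contains k) := by
    intro x
    rw [mem_hits]
    simp only [PySem.Set.empty, List.not_mem_nil, false_or]
    constructor
    · rintro ⟨k, hk, p, hpmem, hpx, hc⟩
      obtain ⟨j, hj, rfl⟩ := (PySem.List.mem_enumerate_iff _ _ _).mp hpmem
      refine ⟨j, hj, by simpa using hpx.symm, ?_⟩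
      simp only [List.any_eq_true]
      exact ⟨k, hk, hc⟩
    · rintro ⟨j, hj, rfl, hPj⟩
      simp only [List.any_eq_true] at hPj
      obtain ⟨k, hk, hc⟩ := hPj
      exact ⟨k, hk, ((0 : Int) + (j : Int), instances[j]),
        (PySem.List.mem_enumerate_iff _ _ _).mpr ⟨j, hj, rfl⟩, by simp, hc⟩
  have hys_pw : (List.filter
      (fun i => keys.any (fun k => (pvTagsOf (PySem.List.pyGetD instances i [])).contains k))
      (PySem.List.pyRange 0 (instances.length : Int) 1)).Pairwise (· < ·) :=
    (PySem.List.pairwise_lt_pyRange_one 0 _).filter _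
  have hys_mem : ∀ x : Int, (x ∈ List.filter
      (fun i => keys.any (fun k => (pvTagsOf (PySem.List.pyGetD instances i [])).contains k))
      (PySem.List.pyRange 0 (instances.length : Int) 1)) ↔
      ∃ (j : Nat) (hj : j < instances.length), x = (j : Int) ∧
        keys.any (fun k => (pvTagsOf instances[j]).contains k) := by
    intro x
    rw [List.mem_filter]
    simp only [PySem.List.mem_pyRange_one]
    constructor
    · rintro ⟨⟨hx0, hxn⟩, hPx⟩
      have hxe : x = ((x.toNat : Nat) : Int) := by omega
      have hjlt : x.toNat < instances.length := by omega
      refine ⟨x.toNat, hjlt, hxe, ?_⟩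
      rw [hxe, PySem.List.pyGetD_natCast, List.getD_eq_getElem _ _ hjlt] at hPx
      exact hPx
    · rintro ⟨j, hj, rfl, hPj⟩
      refine ⟨⟨by positivity, by exact_mod_cast hj⟩, ?_⟩
      rw [PySem.List.pyGetD_natCast, List.getD_eq_getElem _ _ hj]
      exact hPj
  have hperm : (List.filter
      (fun i => keys.any (fun k => (pvTagsOf (PySem.List.pyGetD instances i [])).contains k))
      (PySem.List.pyRange 0 (instances.length : Int) 1)).Perm
      (keys.foldl (fun s k =>
        (PySem.List.enumerate instances 0).foldl
          (fun s p => if (pvTagsOf p.2).contains k then PySem.Set.add s p.1 else s) s)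
        PySem.Set.empty) := by
    refine (List.perm_ext_iff_of_nodup hys_pw.nodup (nodup_hits _ _ _ List.nodup_nil)).mpr ?_
    intro x; rw [hys_mem]; exact (hmem x).symm
  rw [PySem.List.sorted_eq_of_perm_of_pairwise_lt _ _ _ hperm hys_pw]
  have hpred : (fun i : Int => keys.any fun k => (pvTagsOf (PySem.List.pyGetD instances i [])).contains k)
      = ((fun inst => keys.any fun k => (pvTagsOf inst).contains k) ∘ (fun i => PySem.List.pyGetD instances i [])) := rfl
  rw [hpred, ← List.filter_map, PySem.List.map_pyGetD_pyRange_zero']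

-- ===== VERDICT (by name: the statement is the Claim_ definition above) =====
theorem with_keys_spec : Claim_equal_with_keys := by
  intro instances keys _ _
  unfold Spec_with_keys with_keys
  simp only [withKeysInner_eq_any]
  rw [PySem.List.foldl_append_if_eq_filter
    (fun inst => keys.any (fun k => (pvTagsOf inst).contains k)) instances [],
    alt_eq_filter]
  simp
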